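-- pv_equiv track=rewrite | github.com/dumplingstrader/workspace-config | Experion_License_Aggregator/analyze_license_history.py | group_by_system_and_version
-- ===== SOURCE A (Python) =====
-- from collections import defaultdict
--
-- def group_by_system_and_version(all_versions):
--     """Group versions by system (MSID) and sort by version number."""
--     systems = defaultdict(list)
--
--     for version in all_versions:
--         key = version['msid']
--         systems[key].append(version)
--
--     # Sort each system's versions
--     for msid in systems:
--         systems[msid].sort(key=lambda x: x['version'])
--
--     return systems
-- ===== SOURCE B (Python) =====
-- def group_by_system_and_version(all_versions):
--     """Group versions by system (MSID) and sort by version number."""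
--     # Register each MSID at its first appearance so key order matches input order,
--     # then distribute a single globally version-sorted pass into the groups:
--     # stability of sorted() leaves every group sorted by version with the same tie order.
--     systems = {version['msid']: [] for version in all_versions}
--     for version in sorted(all_versions, key=lambda x: x['version']):
--         systems[version['msid']].append(version)
--     return systems
-- ===== Notes on version B (the rewrite author's own statement) =====
-- stated objective: simpler
-- what changed: Instead of grouping first and then sorting every group separately, B pre-registers each msid key in first-appearance order and then makes one pass over a single stable global sort of all_versions by version, appending each item to its group; stability makes every group come out sorted with A's tie order.
import Mathlib
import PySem

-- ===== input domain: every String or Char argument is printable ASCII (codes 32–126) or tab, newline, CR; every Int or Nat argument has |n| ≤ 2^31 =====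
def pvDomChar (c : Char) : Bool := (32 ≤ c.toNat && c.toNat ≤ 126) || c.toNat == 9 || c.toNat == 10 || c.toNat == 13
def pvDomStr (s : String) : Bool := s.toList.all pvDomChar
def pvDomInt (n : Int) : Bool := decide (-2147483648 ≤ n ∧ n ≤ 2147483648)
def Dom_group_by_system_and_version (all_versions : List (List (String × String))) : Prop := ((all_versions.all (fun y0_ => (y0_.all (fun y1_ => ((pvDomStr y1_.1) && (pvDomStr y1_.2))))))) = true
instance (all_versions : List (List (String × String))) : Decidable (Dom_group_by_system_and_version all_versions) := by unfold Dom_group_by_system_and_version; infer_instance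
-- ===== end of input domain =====

-- B groups by one stable global sort + a single distributing pass instead of A's group-then-sort-each-group;
-- objective: simpler (one sort, one pass). Equality proved on inputs whose dicts carry the 'msid' and 'version' keys (else Python raises KeyError).

-- ===== PORT A =====
-- version['msid'] / version['version']: exact under Pre_ (key present), ported as getD with an unused default
def pvMsid (v : List (String × String)) : String := (PySem.Dict.mk v).getD "msid" ""
def pvVer (v : List (String × String)) : String := (PySem.Dict.mk v).getD "version" ""

def group_by_system_and_version (all_versions : List (List (String × String))) : List (String × List (List (String × String))) :=
  -- systems = defaultdict(list); for version in all_versions: systems[version['msid']].append(version)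
  let systems := all_versions.foldl
    (fun d version => d.modify (pvMsid version) [] (fun g => g ++ [version]))
    PySem.Dict.empty
  -- for msid in systems: systems[msid].sort(key=lambda x: x['version'])  (in-place overwrite keeps item order)
  let systems := systems.keys.foldl
    (fun d msid => d.insert msid (PySem.List.sorted (d.getD msid []) pvVer))
    systems
  systems.items

-- ===== PORT B =====
def group_by_system_and_version_alt (all_versions : List (List (String × String))) : List (String × List (List (String × String))) :=
  -- systems = {version['msid']: [] for version in all_versions}
  let systems := all_versions.foldl
    (fun d version => d.insert (pvMsid version) ([] : List (List (String × String))))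
    PySem.Dict.empty
  -- for version in sorted(all_versions, key=lambda x: x['version']): systems[version['msid']].append(version)
  -- (the key is always present in systems, so the plain-dict append is exactly Dict.modify here)
  let systems := (PySem.List.sorted all_versions pvVer).foldl
    (fun d version => d.modify (pvMsid version) [] (fun g => g ++ [version]))
    systems
  systems.items

-- ===== PRECONDITION & SPEC =====
-- Pre_ excludes exactly the inputs where some element dict lacks the 'msid' or 'version' key: Python A raises KeyError there.
def Pre_group_by_system_and_version (all_versions : List (List (String × String))) : Prop :=
  ∀ v ∈ all_versions, (PySem.Dict.mk v).contains "msid" = true ∧ (PySem.Dict.mk v).contains "version" = true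
instance (all_versions : List (List (String × String))) : Decidable (Pre_group_by_system_and_version all_versions) := by
  unfold Pre_group_by_system_and_version; infer_instance
def pvWitness_group_by_system_and_version : (List (List (String × String))) :=
  [[("msid", "a"), ("version", "2")], [("msid", "a"), ("version", "1")], [("msid", "b"), ("version", "1")]]

def Spec_group_by_system_and_version (all_versions : List (List (String × String))) (out : List (String × List (List (String × String)))) : Prop := out = group_by_system_and_version_alt all_versions
instance (all_versions : List (List (String × String))) (out : List (String × List (List (String × String)))) : Decidable (Spec_group_by_system_and_version all_versions out) := by unfold Spec_group_by_system_and_version; infer_instance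

-- ===== CLAIM (what is proved, stated in full; the proofs are below) =====
def Claim_equal_group_by_system_and_version : Prop := ∀ (all_versions : List (List (String × String))), Dom_group_by_system_and_version all_versions → Pre_group_by_system_and_version all_versions → Spec_group_by_system_and_version all_versions (group_by_system_and_version all_versions)

-- ===== LEMMAS AND PROOFS =====

-- 'insertBy (<)' puts x in front when x's key is below everything in the list
lemma insertBy_head_lt {α κ : Type} [LinearOrder κ] (key : α → κ) (x : α) (l : List α)
    (h : ∀ z ∈ l, key x < key z) :
    PySem.List.insertBy (fun a b => decide (key a < key b)) x l = x :: l := by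
  cases l with
  | nil => simp [PySem.List.insertBy]
  | cons z t => simp [PySem.List.insertBy, h z (List.mem_cons_self ..)]

-- filter commutes with a stable insertion into a key-sorted list
lemma filter_insertBy {α κ : Type} [LinearOrder κ] (key : α → κ) (p : α → Bool) (x : α) :
    ∀ (acc : List α), acc.Pairwise (fun a b => key a ≤ key b) →
    (PySem.List.insertBy (fun a b => decide (key a < key b)) x acc).filter p =
      if p x then PySem.List.insertBy (fun a b => decide (key a < key b)) x (acc.filter p)
      else acc.filter p := by
  intro acc
  induction acc with
  | nil =>
    intro _
    by_cases hx : p x <;> simp [PySem.List.insertBy, hx]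
  | cons y ys ih =>
    intro hp
    have hy := (List.pairwise_cons.mp hp).1
    have hys := (List.pairwise_cons.mp hp).2
    by_cases hlt : key x < key y
    · rw [show PySem.List.insertBy (fun a b => decide (key a < key b)) x (y :: ys) = x :: y :: ys by
        simp [PySem.List.insertBy, hlt]]
      by_cases hx : p x
      · by_cases hpy : p y
        · simp [hx, hpy, PySem.List.insertBy, hlt]
        · have hins : PySem.List.insertBy (fun a b => decide (key a < key b)) x (List.filter p ys)
              = x :: List.filter p ys := by
            apply insertBy_head_lt
            intro z hz
            exact lt_of_lt_of_le hlt (hy z (List.mem_of_mem_filter hz))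
          simp [hx, hpy, hins]
      · simp [List.filter_cons, hx]
    · rw [show PySem.List.insertBy (fun a b => decide (key a < key b)) x (y :: ys) =
            y :: PySem.List.insertBy (fun a b => decide (key a < key b)) x ys by
        simp [PySem.List.insertBy, hlt]]
      by_cases hx : p x
      · by_cases hpy : p y
        · have hins : PySem.List.insertBy (fun a b => decide (key a < key b)) x (y :: List.filter p ys)
              = y :: PySem.List.insertBy (fun a b => decide (key a < key b)) x (List.filter p ys) := by
            simp [PySem.List.insertBy, hlt]
          simp [ih hys, hx, hpy, hins]
        · simp [ih hys, hx, hpy]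
      · simp [List.filter_cons, ih hys, hx]

-- filter commutes with the stable sort
lemma filter_sorted {α κ : Type} [LinearOrder κ] (key : α → κ) (p : α → Bool) (xs : List α) :
    (PySem.List.sorted xs key).filter p = PySem.List.sorted (xs.filter p) key := by
  induction xs using List.reverseRecOn with
  | nil => rfl
  | append_singleton ys x ih =>
    have hs : ∀ (l : List α), PySem.List.sorted (l ++ [x]) key =
        PySem.List.insertBy (fun a b => decide (key a < key b)) x (PySem.List.sorted l key) := by
      intro l
      rw [PySem.List.sorted_eq_foldl_insertBy, PySem.List.sorted_eq_foldl_insertBy,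
          List.foldl_append]
      rfl
    rw [hs, filter_insertBy key p x _ (PySem.List.sorted_pairwise ys key), ih, List.filter_append]
    by_cases hx : p x
    · rw [if_pos hx, show List.filter p [x] = [x] by simp [hx], hs]
    · rw [if_neg hx, show List.filter p [x] = ([] : List α) by simp [hx], List.append_nil]

-- a fold of A's sorting inserts at keys ≠ k does not change the value at k
lemma getD_sortfold_not_mem :
    ∀ (l : List String) (d : PySem.Dict String (List (List (String × String)))) (k : String),
    k ∉ l →
    (l.foldl (fun d msid => d.insert msid (PySem.List.sorted (d.getD msid []) pvVer)) d).getD k [] =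
      d.getD k [] := by
  intro l
  induction l with
  | nil => intro d k _; rfl
  | cons a t ih =>
    intro d k hk
    simp only [List.foldl_cons]
    rw [ih _ k (fun h => hk (List.mem_cons_of_mem _ h)), PySem.Dict.getD_insert,
        if_neg (fun h => hk (by rw [h]; exact List.mem_cons_self ..))]

-- A's second loop rewrites every (distinct) key's value to its sorted form
lemma getD_sortfold :
    ∀ (l : List String) (d : PySem.Dict String (List (List (String × String)))),
    l.Nodup → ∀ k ∈ l,
    (l.foldl (fun d msid => d.insert msid (PySem.List.sorted (d.getD msid []) pvVer)) d).getD k [] =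
      PySem.List.sorted (d.getD k []) pvVer := by
  intro l
  induction l with
  | nil => intro d _ k hk; cases hk
  | cons a t ih =>
    intro d hl k hk
    simp only [List.foldl_cons]
    rcases List.mem_cons.mp hk with rfl | hkt
    · rw [getD_sortfold_not_mem _ _ _ (List.nodup_cons.mp hl).1, PySem.Dict.getD_insert, if_pos rfl]
    · have hka : k ≠ a := fun h => (List.nodup_cons.mp hl).1 (h ▸ hkt)
      rw [ih _ (List.nodup_cons.mp hl).2 k hkt, PySem.Dict.getD_insert, if_neg hka]

-- updating a set with elements it already has is the identity
lemma set_update_of_subset {α : Type} [BEq α] [LawfulBEq α] :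
    ∀ (l : List α) (s : PySem.Set α), (∀ x ∈ l, x ∈ s) → PySem.Set.update s l = s := by
  intro l
  induction l with
  | nil => intro s _; rfl
  | cons a t ih =>
    intro s h
    show PySem.Set.update (PySem.Set.add s a) t = s
    rw [PySem.Set.add_of_mem (h a (List.mem_cons_self ..))]
    exact ih s (fun x hx => h x (List.mem_cons_of_mem _ hx))

-- B's first loop stores only []
lemma getD_initfold :
    ∀ (l : List (List (String × String)))
      (d : PySem.Dict String (List (List (String × String)))) (k : String),
    d.getD k [] = [] →
    (l.foldl (fun d version => d.insert (pvMsid version) ([] : List (List (String × String)))) d).getD k [] = [] := by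
  intro l
  induction l with
  | nil => intro d k hd; exact hd
  | cons a t ih =>
    intro d k hd
    simp only [List.foldl_cons]
    refine ih _ k ?_
    rw [PySem.Dict.getD_insert]
    split
    · rfl
    · exact hd

-- the grouping fold reads off as a filter
lemma getD_group_fold (l : List (List (String × String)))
    (d : PySem.Dict String (List (List (String × String)))) (k : String) :
    (l.foldl (fun d version => d.modify (pvMsid version) [] (fun g => g ++ [version])) d).getD k [] =
      d.getD k [] ++ l.filter (fun v => pvMsid v == k) := by
  have h : l.foldl (fun d version => d.modify (pvMsid version) [] (fun g => g ++ [version])) d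
      = (l.map (fun v => (pvMsid v, v))).foldl (fun d p => d.modify p.1 [] (fun g => g ++ [p.2])) d := by
    rw [List.foldl_map]
  rw [h, PySem.Dict.getD_foldl_modify_append, List.filter_map, List.map_map]
  simp [Function.comp_def]

-- ===== VERDICT (by name: the statement is the Claim_ definition above) =====
theorem group_by_system_and_version_spec : Claim_equal_group_by_system_and_version := by
  intro xs _ _
  show group_by_system_and_version xs = group_by_system_and_version_alt xs
  simp only [group_by_system_and_version, group_by_system_and_version_alt]
  set d1 := List.foldl (fun d version => d.modify (pvMsid version) [] (fun g => g ++ [version]))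
      PySem.Dict.empty xs with hd1
  set b0 := List.foldl (fun d version => d.insert (pvMsid version) ([] : List (List (String × String))))
      PySem.Dict.empty xs with hb0
  set sx := PySem.List.sorted xs pvVer with hsx
  set dA := List.foldl (fun d msid => d.insert msid (PySem.List.sorted (d.getD msid []) pvVer))
      d1 d1.keys with hdA
  set dB := List.foldl (fun d version => d.modify (pvMsid version) [] (fun g => g ++ [version]))
      b0 sx with hdB
  have hK1 : d1.keys = PySem.Set.ofList (xs.map pvMsid) := by
    rw [hd1]
    simp only [PySem.Dict.keys_foldl_modify_key]
    rfl
  have hN1 : d1.keys.Nodup := by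
    rw [hK1]; exact PySem.Set.nodup_ofList _
  have hKA : dA.keys = d1.keys := by
    rw [hdA]
    simp only [PySem.Dict.keys_foldl_insert]
    exact set_update_of_subset _ _ (fun x hx => hx)
  have hKB0 : b0.keys = PySem.Set.ofList (xs.map pvMsid) := by
    rw [hb0]
    simp only [PySem.Dict.keys_foldl_insert_key]
    rfl
  have hKB : dB.keys = d1.keys := by
    rw [hdB]
    simp only [PySem.Dict.keys_foldl_modify_key]
    rw [hKB0, hK1]
    apply set_update_of_subset
    intro x hx
    rcases List.mem_map.mp hx with ⟨v, hv, rfl⟩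
    have hv' : v ∈ xs := (PySem.List.mem_sorted xs pvVer false v).mp (by rw [hsx] at hv; exact hv)
    exact (PySem.Set.mem_ofList _ _).mpr (List.mem_map_of_mem hv')
  have hval : ∀ k ∈ d1.keys, dA.getD k [] = dB.getD k [] := by
    intro k hk
    have hemp : (PySem.Dict.empty : PySem.Dict String (List (List (String × String)))).getD k [] = [] := rfl
    have hA1 : d1.getD k [] = xs.filter (fun v => pvMsid v == k) := by
      rw [hd1, getD_group_fold, hemp, List.nil_append]
    have hB0 : b0.getD k [] = [] := by
      rw [hb0]; exact getD_initfold xs _ k hemp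
    rw [hdA, getD_sortfold _ _ hN1 k hk, hA1, hdB, getD_group_fold, hB0, List.nil_append, hsx,
        filter_sorted]
  rw [PySem.Dict.items_eq_map_keys dA (by rw [hKA]; exact hN1) ([]),
      PySem.Dict.items_eq_map_keys dB (by rw [hKB]; exact hN1) ([]),
      hKA, hKB]
  apply List.map_congr_left
  intro k hk
  rw [hval k hk]
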